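-- pv_equiv track=rewrite | github.com/ohgodimlemon/Vedant---iSEAO-interview | Q1.py | boundary_summariser
-- ===== SOURCE A (Python) =====
-- def boundary_summariser(list):
--     if not list:
--         return []
--
--     boundary_summarised = []
--     current_boundary = [list[0]] #start with first element, trivial
--
--     for idx in range(len(list) - 1):
--
--         if (list[idx] + 1 != list[idx + 1]):
--             current_boundary.append(list[idx])
--             boundary_summarised.append(current_boundary)
--             current_boundary = [list[idx + 1]] # new starting boundary
--
--     current_boundary.append(list[-1]) # add last element because we never reached there
--     boundary_summarised.append(current_boundary)
--
--     return boundary_summarised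
-- ===== SOURCE B (Python) =====
-- def boundary_summariser(list):
--     # Phase 1: group the sequence into maximal consecutive runs;
--     # Phase 2: map each run to its [first, last] boundary pair.
--     runs = []
--     for v in list:
--         if runs and runs[-1][-1] + 1 == v:
--             runs[-1].append(v)
--         else:
--             runs.append([v])
--     return [[r[0], r[-1]] for r in runs]
-- ===== Notes on version B (the rewrite author's own statement) =====
-- stated objective: alternative
-- what changed: B first folds the list into explicit maximal consecutive runs and then maps each run to its [first,last] pair, instead of A's single pass that detects breakpoints at adjacent index pairs while mutating a partial current_boundary.
import Mathlib
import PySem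

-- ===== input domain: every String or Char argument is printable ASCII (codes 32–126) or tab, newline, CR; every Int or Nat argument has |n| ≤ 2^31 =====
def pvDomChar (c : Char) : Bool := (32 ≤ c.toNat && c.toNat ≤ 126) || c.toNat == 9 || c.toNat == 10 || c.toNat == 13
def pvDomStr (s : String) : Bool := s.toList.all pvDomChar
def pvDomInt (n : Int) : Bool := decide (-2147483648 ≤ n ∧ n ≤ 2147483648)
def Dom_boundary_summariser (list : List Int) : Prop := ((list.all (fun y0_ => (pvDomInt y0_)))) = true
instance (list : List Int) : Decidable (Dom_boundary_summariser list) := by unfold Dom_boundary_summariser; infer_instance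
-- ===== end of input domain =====

-- B groups the list into explicit maximal consecutive runs and then maps each run to its
-- [first, last] pair (a different decomposition of the same linear task; no speed claim).


-- ===== PORT A =====
-- A's for-loop over adjacent index pairs, as the obvious structural recursion over the
-- suffix of the list, carrying (boundary_summarised, current_boundary) as state.
def pvALoop (acc : List (List Int)) (cur : List Int) : List Int → (List (List Int)) × List Int
  | x :: y :: rest =>
      if x + 1 ≠ y then pvALoop (acc ++ [cur ++ [x]]) [y] (y :: rest)
      else pvALoop acc cur (y :: rest)
  | _ => (acc, cur)

def boundary_summariser (list : List Int) : List (List Int) :=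
  match list with
  | [] => []
  | x :: _ =>
    let st := pvALoop [] [x] list
    st.1 ++ [st.2 ++ [(PySem.List.pyGet? list (-1)).getD 0]]

-- ===== PORT B =====
-- one step of B's run-building loop: extend the last run or start a new one
def pvStepB (runs : List (List Int)) (v : Int) : List (List Int) :=
  match runs.getLast? with
  | some r => if r.getLastD 0 + 1 = v then runs.dropLast ++ [r ++ [v]] else runs ++ [[v]]
  | none => [[v]]

def boundary_summariser_alt (list : List Int) : List (List Int) :=
  (list.foldl pvStepB []).map (fun r => [r.headD 0, r.getLastD 0])

-- ===== PRECONDITION & SPEC =====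
def Spec_boundary_summariser (list : List Int) (out : List (List Int)) : Prop := out = boundary_summariser_alt list
instance (list : List Int) (out : List (List Int)) : Decidable (Spec_boundary_summariser list out) := by unfold Spec_boundary_summariser; infer_instance

-- ===== CLAIM (what is proved, stated in full; the proofs are below) =====
def Claim_equal_boundary_summariser : Prop := ∀ (list : List Int), Dom_boundary_summariser list → Spec_boundary_summariser list (boundary_summariser list)

-- ===== LEMMAS AND PROOFS =====

-- reference grouping: the maximal consecutive runs of the list (built from the right)
def pvRuns : List Int → List (List Int)
  | [] => []
  | x :: xs =>
    match pvRuns xs with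
    | (z :: r) :: rest => if x + 1 = z then (x :: z :: r) :: rest else [x] :: (z :: r) :: rest
    | _ => [[x]]

def pvBounds (r : List Int) : List Int := [r.headD 0, r.getLastD 0]

theorem pvRuns_cons (x : Int) (xs : List Int) :
    pvRuns (x :: xs) =
      match pvRuns xs with
      | (z :: r) :: rest => if x + 1 = z then (x :: z :: r) :: rest else [x] :: (z :: r) :: rest
      | _ => [[x]] := rfl

-- the first run of a nonempty list starts with its head
theorem pvRuns_head (x : Int) (t : List Int) :
    ∃ r rest, pvRuns (x :: t) = (x :: r) :: rest := by
  cases h : pvRuns t with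
  | nil => exact ⟨[], [], by rw [pvRuns_cons, h]⟩
  | cons hd tl =>
    cases hd with
    | nil => exact ⟨[], [], by rw [pvRuns_cons, h]⟩
    | cons z r =>
      by_cases hc : x + 1 = z
      · exact ⟨z :: r, tl, by rw [pvRuns_cons, h]; simp [hc]⟩
      · exact ⟨[], (z :: r) :: tl, by rw [pvRuns_cons, h]; simp [hc]⟩

-- output of the algorithm viewed with an overriding start value s for the first run
def pvG (s : Int) (l : List Int) : List (List Int) :=
  match pvRuns l with
  | r :: rs => [s, r.getLastD 0] :: rs.map pvBounds
  | [] => []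

theorem pvALoop_char (t : List Int) :
    ∀ (x : Int) (acc : List (List Int)) (s : Int),
      (pvALoop acc [s] (x :: t)).1 ++ [(pvALoop acc [s] (x :: t)).2 ++ [(x :: t).getLastD 0]]
        = acc ++ pvG s (x :: t) := by
  induction t with
  | nil =>
    intro x acc s
    simp [pvALoop, pvG, pvRuns]
  | cons y t' ih =>
    intro x acc s
    obtain ⟨r, rest, hr⟩ := pvRuns_head y t'
    have hA := pvRuns_cons x (y :: t')
    rw [hr] at hA
    by_cases hc : x + 1 = y
    · have h1 : pvALoop acc [s] (x :: y :: t') = pvALoop acc [s] (y :: t') := by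
        simp [pvALoop, hc]
      have hlast : (x :: y :: t').getLastD 0 = (y :: t').getLastD 0 := by simp
      rw [h1, hlast, ih y acc s]
      have hA' : pvRuns (x :: y :: t') = (x :: y :: r) :: rest := by rw [hA]; simp [hc]
      simp [pvG, hr, hA']
    · have h1 : pvALoop acc [s] (x :: y :: t') = pvALoop (acc ++ [[s, x]]) [y] (y :: t') := by
        simp [pvALoop, hc]
      have hlast : (x :: y :: t').getLastD 0 = (y :: t').getLastD 0 := by simp
      rw [h1, hlast, ih y (acc ++ [[s, x]]) y]
      have hA' : pvRuns (x :: y :: t') = [x] :: (y :: r) :: rest := by rw [hA]; simp [hc]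
      simp [pvG, hr, hA', pvBounds]

theorem pvA_char (l : List Int) : boundary_summariser l = (pvRuns l).map pvBounds := by
  cases l with
  | nil => simp [boundary_summariser, pvRuns]
  | cons x t =>
    obtain ⟨r, rest, hr⟩ := pvRuns_head x t
    show (pvALoop [] [x] (x :: t)).1 ++
        [(pvALoop [] [x] (x :: t)).2 ++ [(PySem.List.pyGet? (x :: t) (-1)).getD 0]]
      = (pvRuns (x :: t)).map pvBounds
    rw [PySem.List.pyGet?_neg_one]
    have hl : (x :: t).getLast?.getD 0 = (x :: t).getLastD 0 := by
      simp [List.getLastD_eq_getLast?]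
    rw [hl, pvALoop_char t x [] x]
    simp [pvG, hr, pvBounds]

-- glue a finished prefix of runs rs onto the runs R of the remaining suffix
def pvMerge (rs R : List (List Int)) : List (List Int) :=
  match rs.getLast? with
  | some r =>
    match R with
    | (z :: r') :: rest =>
        if r.getLastD 0 + 1 = z then rs.dropLast ++ ((r ++ z :: r') :: rest) else rs ++ R
    | _ => rs ++ R
  | none => R

theorem pvMerge_nil_right (rs : List (List Int)) : pvMerge rs [] = rs := by
  cases h : rs.getLast? with
  | none => simp [pvMerge, List.getLast?_eq_none_iff.mp h]
  | some r => simp [pvMerge, h]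

theorem pvMerge_single (rs : List (List Int)) (x : Int) : pvMerge rs [[x]] = pvStepB rs x := by
  cases h : rs.getLast? with
  | none => simp [pvMerge, pvStepB, h]
  | some r => simp [pvMerge, pvStepB, h]

theorem pvStepB_concat (done : List (List Int)) (rr : List Int) (x : Int) :
    pvStepB (done ++ [rr]) x =
      if rr.getLastD 0 + 1 = x then done ++ [rr ++ [x]] else done ++ [rr] ++ [[x]] := by
  unfold pvStepB
  rw [List.getLast?_concat]
  simp

theorem pvMerge_concat (done : List (List Int)) (rr : List Int) (z : Int) (r' : List Int)
    (rest : List (List Int)) :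
    pvMerge (done ++ [rr]) ((z :: r') :: rest) =
      if rr.getLastD 0 + 1 = z then done ++ ((rr ++ z :: r') :: rest)
      else (done ++ [rr]) ++ (z :: r') :: rest := by
  unfold pvMerge
  rw [List.getLast?_concat]
  simp

theorem pvFoldl_merge (l : List Int) :
    ∀ rs, l.foldl pvStepB rs = pvMerge rs (pvRuns l) := by
  induction l with
  | nil => intro rs; simp [pvRuns, pvMerge_nil_right]
  | cons x xs ih =>
    intro rs
    rw [List.foldl_cons, ih]
    cases hxs : xs with
    | nil =>
      subst hxs
      rw [show pvRuns [x] = [[x]] from rfl, show pvRuns ([] : List Int) = [] from rfl,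
        pvMerge_nil_right, pvMerge_single]
    | cons y t =>
      subst hxs
      obtain ⟨r', rest, hr⟩ := pvRuns_head y t
      have hA := pvRuns_cons x (y :: t)
      rw [hr] at hA
      rw [hr]
      rcases rs.eq_nil_or_concat with hrs | ⟨done, rr, hrs⟩
      · subst hrs
        by_cases hc : x + 1 = y
        · have hA' : pvRuns (x :: y :: t) = (x :: y :: r') :: rest := by rw [hA]; simp [hc]
          simp [pvMerge, pvStepB, hA', hc]
        · have hA' : pvRuns (x :: y :: t) = [x] :: (y :: r') :: rest := by rw [hA]; simp [hc]
          simp [pvMerge, pvStepB, hA', hc]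
      · subst hrs
        simp only [List.concat_eq_append]
        rw [pvStepB_concat]
        by_cases hp : rr.getLastD 0 + 1 = x
        all_goals have hp' := hp
        all_goals rw [List.getLastD_eq_getLast?] at hp'
        · rw [if_pos hp]
          by_cases hc : x + 1 = y
          · have hA' : pvRuns (x :: y :: t) = (x :: y :: r') :: rest := by rw [hA]; simp [hc]
            rw [hA', pvMerge_concat, pvMerge_concat]
            simp [hp', hc, List.append_assoc]
          · have hA' : pvRuns (x :: y :: t) = [x] :: (y :: r') :: rest := by rw [hA]; simp [hc]
            rw [hA', pvMerge_concat]
            simp [pvMerge, hp', hc]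
        · rw [if_neg hp]
          by_cases hc : x + 1 = y
          · have hA' : pvRuns (x :: y :: t) = (x :: y :: r') :: rest := by rw [hA]; simp [hc]
            rw [hA', pvMerge_concat]
            simp [pvMerge, hp', hc, List.append_assoc]
          · have hA' : pvRuns (x :: y :: t) = [x] :: (y :: r') :: rest := by rw [hA]; simp [hc]
            rw [hA', pvMerge_concat]
            simp [pvMerge, hp', hc, List.append_assoc]

theorem pvB_char (l : List Int) : boundary_summariser_alt l = (pvRuns l).map pvBounds := by
  unfold boundary_summariser_alt
  rw [pvFoldl_merge l [], show pvMerge [] (pvRuns l) = pvRuns l from by simp [pvMerge]]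
  simp [pvBounds]

-- ===== VERDICT (by name: the statement is the Claim_ definition above) =====
theorem boundary_summariser_spec : Claim_equal_boundary_summariser := by
  intro l _
  unfold Spec_boundary_summariser
  rw [pvA_char, pvB_char]
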